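-- pv_equiv track=rewrite | github.com/lhaase/cms | src/PageRanker.py | createBacklinkGraph
-- ===== SOURCE A (Python) =====
-- def createBacklinkGraph(webGraph):
--     backlinkGraph = {}
--     for page in sorted(webGraph.keys()):
--         backlinks = []
--         for link in sorted(webGraph.keys()):
--             if page in webGraph[link]: backlinks.append(link)
--         backlinkGraph[page] = backlinks
--     return backlinkGraph
-- ===== SOURCE B (Python) =====
-- def createBacklinkGraph(webGraph):
--     pages = sorted(webGraph)
--     keyset = set(webGraph)
--     edges = sorted((target, link)
--                    for link in pages
--                    for target in dict.fromkeys(webGraph[link])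
--                    if target in keyset)
--     i = 0
--     backlinkGraph = {}
--     for page in pages:
--         backlinks = []
--         while i < len(edges) and edges[i][0] == page:
--             backlinks.append(edges[i][1])
--             i += 1
--         backlinkGraph[page] = backlinks
--     return backlinkGraph
-- ===== Notes on version B (the rewrite author's own statement) =====
-- stated objective: faster
-- what changed: Replaces A's nested scan (for every page, re-scan every page's link list for membership) with building the (target, link) edge list once, sorting it, and slicing it into consecutive runs, one run per sorted page.
import Mathlib
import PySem

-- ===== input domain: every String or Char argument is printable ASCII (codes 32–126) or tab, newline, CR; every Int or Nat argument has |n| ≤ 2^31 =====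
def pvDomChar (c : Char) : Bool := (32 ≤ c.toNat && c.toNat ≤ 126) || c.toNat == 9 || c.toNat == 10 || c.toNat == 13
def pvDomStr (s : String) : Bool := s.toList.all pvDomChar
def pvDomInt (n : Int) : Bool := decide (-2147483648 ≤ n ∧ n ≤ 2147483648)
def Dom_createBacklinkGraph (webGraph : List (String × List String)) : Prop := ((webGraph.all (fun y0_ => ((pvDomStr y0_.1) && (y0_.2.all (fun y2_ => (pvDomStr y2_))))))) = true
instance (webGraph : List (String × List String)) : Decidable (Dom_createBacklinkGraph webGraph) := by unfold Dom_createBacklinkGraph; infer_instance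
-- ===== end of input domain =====

-- B replaces A's quadratic nested scan by building the (target, link) edge list once, sorting it,
-- and slicing it into consecutive runs per sorted page; objective: faster (asymptotic).

-- ===== PORT A =====
def createBacklinkGraph (webGraph : List (String × List String)) : List (String × List String) :=
  let d := PySem.Dict.ofList webGraph
  let backlinkGraph : PySem.Dict String (List String) :=
    (PySem.List.sorted d.keys (fun k => k)).foldl
      (fun bg page =>
        let backlinks :=
          (PySem.List.sorted d.keys (fun k => k)).foldl
            (fun bl link => if (d.getD link []).contains page then bl ++ [link] else bl) []
        bg.insert page backlinks)
      PySem.Dict.empty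
  backlinkGraph.items

-- ===== PORT B =====
-- Source B's inner 'while i < len(edges) and edges[i][0] == page' loop: consume the run of edges whose
-- target is `page`, returning its links and the remaining edges
def pvTakeGroup (p : String) : List (String × String) → List String × List (String × String)
  | [] => ([], [])
  | e :: es =>
    if e.1 == p then
      let r := pvTakeGroup p es
      (e.2 :: r.1, r.2)
    else ([], e :: es)

-- Source B's outer 'for page in pages' grouping loop, producing the (page, backlinks) pairs in order
def pvGroup : List String → List (String × String) → List (String × List String)
  | [], _ => []
  | p :: ps, es =>
    let r := pvTakeGroup p es
    (p, r.1) :: pvGroup ps r.2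

def createBacklinkGraph_alt (webGraph : List (String × List String)) : List (String × List String) :=
  let d := PySem.Dict.ofList webGraph
  let pages := PySem.List.sorted d.keys (fun k => k)
  let keyset : PySem.Set String := PySem.Set.ofList d.keys
  let edges :=
    PySem.List.sorted
      (pages.flatMap (fun link =>
        ((PySem.List.dedup (d.getD link [])).filter (fun t => keyset.contains t)).map
          (fun t => (t, link))))
      (fun e => (toLex e : Lex (String × String)))   -- Python's sorted() on pairs of strings: lexicographic
  (PySem.Dict.ofList (pvGroup pages edges)).items

-- ===== PRECONDITION & SPEC =====
def Spec_createBacklinkGraph (webGraph : List (String × List String)) (out : List (String × List String)) : Prop := out = createBacklinkGraph_alt webGraph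
instance (webGraph : List (String × List String)) (out : List (String × List String)) : Decidable (Spec_createBacklinkGraph webGraph out) := by unfold Spec_createBacklinkGraph; infer_instance

-- ===== CLAIM (what is proved, stated in full; the proofs are below) =====
def Claim_equal_createBacklinkGraph : Prop := ∀ (webGraph : List (String × List String)), Dom_createBacklinkGraph webGraph → Spec_createBacklinkGraph webGraph (createBacklinkGraph webGraph)

-- ===== LEMMAS AND PROOFS =====

-- pvTakeGroup splits off exactly a leading block whose targets all equal p
theorem pv_takeGroup_append (p : String) (b rest : List (String × String))
    (hb : ∀ e ∈ b, e.1 = p) (hr : ∀ e ∈ rest, e.1 ≠ p) :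
    pvTakeGroup p (b ++ rest) = (b.map (·.2), rest) := by
  induction b with
  | nil =>
    cases rest with
    | nil => rfl
    | cons e es =>
      have : (e.1 == p) = false := by
        simpa using hr e (List.mem_cons_self)
      simp [pvTakeGroup, this]
  | cons e b ih =>
    have he : (e.1 == p) = true := by
      simpa using hb e (List.mem_cons_self)
    have ih' := ih (fun x hx => hb x (List.mem_cons_of_mem _ hx))
    simp [pvTakeGroup, he, ih']

-- pvGroup over the concatenation of per-page blocks recovers the per-page lists
theorem pv_group_eq (d : PySem.Dict String (List String)) (ksAll : List String) :
    ∀ ks : List String, ks.Nodup →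
    pvGroup ks (ks.flatMap (fun p =>
        (ksAll.filter (fun l => (d.getD l []).contains p)).map (fun l => (p, l))))
      = ks.map (fun p => (p, ksAll.filter (fun l => (d.getD l []).contains p))) := by
  intro ks
  induction ks with
  | nil => intro _; rfl
  | cons p ps ih =>
    intro hnd
    rcases List.nodup_cons.mp hnd with ⟨hp, hnd'⟩
    simp only [List.flatMap_cons, pvGroup]
    rw [pv_takeGroup_append p _ _
      (by intro e he; rcases List.mem_map.mp he with ⟨l, _, rfl⟩; rfl)
      (by
        intro e he hep
        rcases List.mem_flatMap.mp he with ⟨q, hq, hmem⟩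
        rcases List.mem_map.mp hmem with ⟨l, _, rfl⟩
        exact hp (hep ▸ hq))]
    simp only [List.map_map, List.map_cons]
    rw [ih hnd']
    congr 1
    simp

-- membership in B's raw edge list
theorem pv_mem_rawEdges (d : PySem.Dict String (List String)) (ks : List String)
    (hkeys : ∀ x, x ∈ ks ↔ x ∈ d.keys) (e : String × String) :
    e ∈ ks.flatMap (fun link =>
        ((PySem.List.dedup (d.getD link [])).filter
          (fun t => (PySem.Set.ofList d.keys).contains t)).map (fun t => (t, link)))
      ↔ e.1 ∈ ks ∧ e.2 ∈ ks ∧ (d.getD e.2 []).contains e.1 = true := by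
  constructor
  · intro he
    rcases List.mem_flatMap.mp he with ⟨l, hl, hmem⟩
    rcases List.mem_map.mp hmem with ⟨t, ht, rfl⟩
    rcases List.mem_filter.mp ht with ⟨htd, htk⟩
    refine ⟨?_, hl, ?_⟩
    · exact (hkeys t).mpr ((PySem.Set.mem_ofList _ _).mp (List.contains_iff_mem.mp htk))
    · exact List.contains_iff_mem.mpr ((PySem.List.mem_dedup _ _).mp htd)
  · rintro ⟨h1, h2, h3⟩
    refine List.mem_flatMap.mpr ⟨e.2, h2, List.mem_map.mpr ⟨e.1, ?_, rfl⟩⟩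
    refine List.mem_filter.mpr ⟨(PySem.List.mem_dedup _ _).mpr (List.contains_iff_mem.mp h3), ?_⟩
    exact List.contains_iff_mem.mpr ((PySem.Set.mem_ofList _ _).mpr ((hkeys e.1).mp h1))

-- membership in the canonical per-page edge list
theorem pv_mem_canonEdges (d : PySem.Dict String (List String)) (ks : List String)
    (e : String × String) :
    e ∈ ks.flatMap (fun p =>
        (ks.filter (fun l => (d.getD l []).contains p)).map (fun l => (p, l)))
      ↔ e.1 ∈ ks ∧ e.2 ∈ ks ∧ (d.getD e.2 []).contains e.1 = true := by
  constructor
  · intro he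
    rcases List.mem_flatMap.mp he with ⟨p, hp, hmem⟩
    rcases List.mem_map.mp hmem with ⟨l, hl, rfl⟩
    rcases List.mem_filter.mp hl with ⟨hlk, hc⟩
    exact ⟨hp, hlk, hc⟩
  · rintro ⟨h1, h2, h3⟩
    exact List.mem_flatMap.mpr ⟨e.1, h1,
      List.mem_map.mpr ⟨e.2, List.mem_filter.mpr ⟨h2, h3⟩, rfl⟩⟩

-- B's sorted edge list IS the canonical per-page edge list
theorem pv_edges_sorted (d : PySem.Dict String (List String)) (ks : List String)
    (hnd : ks.Nodup) (hlt : ks.Pairwise (· < ·)) (hkeys : ∀ x, x ∈ ks ↔ x ∈ d.keys) :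
    PySem.List.sorted
      (ks.flatMap (fun link =>
        ((PySem.List.dedup (d.getD link [])).filter
          (fun t => (PySem.Set.ofList d.keys).contains t)).map (fun t => (t, link))))
      (fun e => (toLex e : Lex (String × String)))
      = ks.flatMap (fun p =>
          (ks.filter (fun l => (d.getD l []).contains p)).map (fun l => (p, l))) := by
  apply PySem.List.sorted_eq_of_perm_of_pairwise_lt
  · -- permutation: both lists are nodup with the same membership
    have hnd1 : (ks.flatMap (fun link =>
        ((PySem.List.dedup (d.getD link [])).filter
          (fun t => (PySem.Set.ofList d.keys).contains t)).map (fun t => (t, link)))).Nodup := by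
      rw [List.nodup_flatMap]
      constructor
      · intro l _
        exact ((PySem.List.nodup_dedup _).filter _).map
          (fun a b h => by simpa using congrArg Prod.fst h)
      · refine hnd.imp (fun {a b} hab => ?_)
        intro e hea heb
        rcases List.mem_map.mp hea with ⟨t, _, rfl⟩
        rcases List.mem_map.mp heb with ⟨t', _, h⟩
        exact hab (by simpa using congrArg Prod.snd h.symm)
    have hnd2 : (ks.flatMap (fun p =>
        (ks.filter (fun l => (d.getD l []).contains p)).map (fun l => (p, l)))).Nodup := by
      rw [List.nodup_flatMap]
      constructor
      · intro p _
        exact (hnd.filter _).map (fun a b h => by simpa using congrArg Prod.snd h)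
      · refine hnd.imp (fun {a b} hab => ?_)
        intro e hea heb
        rcases List.mem_map.mp hea with ⟨l, _, rfl⟩
        rcases List.mem_map.mp heb with ⟨l', _, h⟩
        exact hab (by simpa using congrArg Prod.fst h.symm)
    refine (List.perm_ext_iff_of_nodup hnd2 hnd1).mpr ?_
    intro e
    rw [pv_mem_rawEdges d ks hkeys e, pv_mem_canonEdges d ks e]
  · -- the canonical list is strictly increasing in the lexicographic key
    rw [List.pairwise_flatMap]
    constructor
    · intro p _
      refine List.Pairwise.map _ (fun a b hab => ?_) (hlt.filter _)
      exact Prod.Lex.toLex_lt_toLex.mpr (Or.inr ⟨rfl, hab⟩)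
    · refine hlt.imp (fun {p q} hpq => ?_)
      intro x hx y hy
      rcases List.mem_map.mp hx with ⟨l, _, rfl⟩
      rcases List.mem_map.mp hy with ⟨l', _, rfl⟩
      exact Prod.Lex.toLex_lt_toLex.mpr (Or.inl hpq)

-- ===== VERDICT (by name: the statement is the Claim_ definition above) =====
theorem createBacklinkGraph_spec : Claim_equal_createBacklinkGraph := by
  intro webGraph _
  unfold Spec_createBacklinkGraph createBacklinkGraph createBacklinkGraph_alt
  simp only []
  set d := PySem.Dict.ofList webGraph with hd
  set ks := PySem.List.sorted d.keys (fun k => k) with hks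
  have hnd : ks.Nodup :=
    ((PySem.List.sorted_perm d.keys (fun k => k) false).symm.nodup (PySem.Dict.nodup_keys_ofList webGraph))
  have hlt : ks.Pairwise (· < ·) := by
    have hle : ks.Pairwise (fun a b => a ≤ b) := PySem.List.sorted_pairwise d.keys (fun k => k)
    exact (hle.and hnd).imp (fun {a b} h => lt_of_le_of_ne h.1 h.2)
  -- A's side: a fold of fresh inserts over the nodup key list
  have hA : (ks.foldl
      (fun bg page =>
        bg.insert page (ks.foldl (fun bl link => if (d.getD link []).contains page then bl ++ [link] else bl) []))
      PySem.Dict.empty).items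
      = ks.map (fun page => (page, ks.filter (fun link => (d.getD link []).contains page))) := by
    rw [PySem.Dict.items_foldl_insert_fresh ks (fun a => a)
      (fun page => ks.foldl (fun bl link => if (d.getD link []).contains page then bl ++ [link] else bl) [])
      PySem.Dict.empty (fun a _ => PySem.Dict.contains_empty a) (by simpa using hnd)]
    have hemp : (PySem.Dict.empty : PySem.Dict String (List String)).items = [] := rfl
    simp only [hemp, List.nil_append]
    apply List.map_congr_left
    intro page _
    have := PySem.List.foldl_append_if (fun link => (d.getD link []).contains page) (fun x => x) ks []
    simpa using this
  rw [hA]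
  -- B's side
  rw [pv_edges_sorted d ks hnd hlt
    (fun x => by rw [hks, PySem.List.mem_sorted])]
  rw [pv_group_eq d ks ks hnd]
  -- dict(pairs) with fresh distinct keys: items = pairs
  have hkeysmap : ((ks.map (fun p => (p, ks.filter (fun l => (d.getD l []).contains p)))).map Prod.fst).Nodup := by
    simpa [List.map_map, Function.comp_def] using hnd
  rw [show (PySem.Dict.ofList (ks.map (fun p => (p, ks.filter (fun l => (d.getD l []).contains p)))) :
        PySem.Dict String (List String))
      = (ks.map (fun p => (p, ks.filter (fun l => (d.getD l []).contains p)))).foldl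
          (fun dd a => dd.insert a.1 a.2) PySem.Dict.empty from rfl]
  rw [PySem.Dict.items_foldl_insert_fresh _ Prod.fst Prod.snd PySem.Dict.empty
    (fun a _ => PySem.Dict.contains_empty a.1) hkeysmap]
  have hemp : (PySem.Dict.empty : PySem.Dict String (List String)).items = [] := rfl
  simp [hemp]
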